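-- pv_equiv track=rewrite | github.com/longytravel/forexpipeline | src/python/validation/cpcv.py | _apply_purge_embargo
-- ===== SOURCE A (Python) =====
-- def _apply_purge_embargo(
--     train_ranges: list[tuple[int, int]],
--     test_ranges: list[tuple[int, int]],
--     purge_bars: int,
--     embargo_bars: int,
-- ) -> list[tuple[int, int]]:
--     """Apply purge/embargo gaps to train ranges near test boundaries."""
--     if not test_ranges:
--         return train_ranges
--
--     # Build set of bars to exclude (purge before test, embargo after test)
--     excluded = set()
--     for test_start, test_end in test_ranges:
--         # Purge: bars before test start
--         for b in range(max(0, test_start - purge_bars), test_start):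
--             excluded.add(b)
--         # Embargo: bars after test end
--         for b in range(test_end, test_end + embargo_bars):
--             excluded.add(b)
--
--     # Filter train ranges
--     purged = []
--     for start, end in train_ranges:
--         # Find contiguous segments not in excluded
--         seg_start = None
--         for b in range(start, end):
--             if b not in excluded:
--                 if seg_start is None:
--                     seg_start = b
--             else:
--                 if seg_start is not None:
--                     purged.append((seg_start, b))
--                     seg_start = None
--         if seg_start is not None:
--             purged.append((seg_start, end))
--
--     return purged
-- ===== SOURCE B (Python) =====
-- def _apply_purge_embargo(
--     train_ranges: list[tuple[int, int]],
--     test_ranges: list[tuple[int, int]],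
--     purge_bars: int,
--     embargo_bars: int,
-- ) -> list[tuple[int, int]]:
--     """Interval arithmetic: merge the excluded intervals once, then subtract
--     them from each train range. No per-bar work."""
--     if not test_ranges:
--         return train_ranges
--
--     # Excluded intervals (half-open), same emptiness rules as range()
--     raw = []
--     for ts, te in test_ranges:
--         raw.append((max(0, ts - purge_bars), ts))
--         raw.append((te, te + embargo_bars))
--     ivs = sorted([iv for iv in raw if iv[0] < iv[1]], key=lambda iv: iv[0])
--
--     # Merge overlapping/adjacent excluded intervals
--     merged = []
--     if ivs:
--         lo, hi = ivs[0]
--         for a, b in ivs[1:]: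
--             if a <= hi:
--                 hi = max(hi, b)
--             else:
--                 merged.append((lo, hi))
--                 lo, hi = a, b
--         merged.append((lo, hi))
--
--     # Subtract the merged intervals from each train range
--     out = []
--     for s, e in train_ranges:
--         cur = s
--         for a, b in merged:
--             if b <= cur or e <= a:
--                 continue
--             if cur < a:
--                 out.append((cur, a))
--             cur = b
--         if cur < e:
--             out.append((cur, e))
--     return out
-- ===== Notes on version B (the rewrite author's own statement) =====
-- stated objective: faster
-- what changed: Replaces the per-bar excluded set and per-bar scan of every train range with interval arithmetic: the excluded intervals are merged once (sort + linear merge) and then subtracted from each train range, so the cost depends on the number of ranges, not the number of bars.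
import Mathlib
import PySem

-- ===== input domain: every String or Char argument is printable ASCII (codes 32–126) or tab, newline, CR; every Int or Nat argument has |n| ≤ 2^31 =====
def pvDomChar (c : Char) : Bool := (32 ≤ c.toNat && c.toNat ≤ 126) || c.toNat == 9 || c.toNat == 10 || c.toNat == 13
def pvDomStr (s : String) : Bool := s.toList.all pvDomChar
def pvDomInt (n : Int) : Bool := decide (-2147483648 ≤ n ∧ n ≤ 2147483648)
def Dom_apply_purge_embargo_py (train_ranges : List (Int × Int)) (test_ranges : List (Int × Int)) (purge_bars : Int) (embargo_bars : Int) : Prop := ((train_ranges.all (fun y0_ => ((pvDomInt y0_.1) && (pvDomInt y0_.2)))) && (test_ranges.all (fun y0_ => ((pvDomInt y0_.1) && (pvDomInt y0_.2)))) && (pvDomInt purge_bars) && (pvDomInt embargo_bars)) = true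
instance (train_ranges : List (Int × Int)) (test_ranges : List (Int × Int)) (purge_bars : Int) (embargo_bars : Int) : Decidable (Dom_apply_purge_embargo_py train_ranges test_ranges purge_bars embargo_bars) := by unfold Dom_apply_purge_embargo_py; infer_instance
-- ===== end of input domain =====

-- B replaces A's per-bar excluded set and per-bar scan by interval arithmetic
-- (merge the excluded intervals once, then subtract them from each train range).

-- ===== PORT A =====
-- the body of A's inner per-bar loop (seg_start tracking), kept as a named helper
def pvScanStep (P : Int → Bool) (st : List (Int × Int) × Option Int) (b : Int) :
    List (Int × Int) × Option Int :=
  if !(P b) then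
    match st.2 with
    | none => (st.1, some b)
    | some _ => st
  else
    match st.2 with
    | some v => (st.1 ++ [(v, b)], none)
    | none => st

-- the 'if seg_start is not None: purged.append((seg_start, end))' tail of A's loop
def pvFin (e : Int) (r : List (Int × Int) × Option Int) : List (Int × Int) :=
  match r.2 with
  | some v => r.1 ++ [(v, e)]
  | none => r.1

def apply_purge_embargo_py (train_ranges : List (Int × Int)) (test_ranges : List (Int × Int)) (purge_bars : Int) (embargo_bars : Int) : List (Int × Int) :=
  if test_ranges = [] then train_ranges
  else
    let excluded : Std.HashSet Int := test_ranges.foldl (fun ex tt =>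
        (PySem.List.pyRange tt.2 (tt.2 + embargo_bars) 1).foldl (fun s b => s.insert b)
          ((PySem.List.pyRange (max 0 (tt.1 - purge_bars)) tt.1 1).foldl (fun s b => s.insert b) ex))
      ∅
    train_ranges.foldl (fun acc se =>
        pvFin se.2 ((PySem.List.pyRange se.1 se.2 1).foldl
          (pvScanStep (fun b => excluded.contains b)) (acc, none))) []

-- ===== PORT B =====
-- B's merge loop: (lo, hi) is the currently open merged interval
def pvMergeGo : List (Int × Int) → Int → Int → List (Int × Int)
  | [], lo, hi => [(lo, hi)]
  | q :: rest, lo, hi =>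
    if q.1 ≤ hi then pvMergeGo rest lo (max hi q.2)
    else (lo, hi) :: pvMergeGo rest q.1 q.2

-- the body of B's subtraction loop: state = (out, cur)
def pvSubStep (e : Int) (st : List (Int × Int) × Int) (ab : Int × Int) :
    List (Int × Int) × Int :=
  if ab.2 ≤ st.2 ∨ e ≤ ab.1 then st
  else ((if st.2 < ab.1 then st.1 ++ [(st.2, ab.1)] else st.1), ab.2)

-- B's per-train-range subtraction (the inner loop plus the trailing append)
def pvSubRange (M : List (Int × Int)) (e : Int) (st : List (Int × Int) × Int) :
    List (Int × Int) :=
  let r := M.foldl (pvSubStep e) st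
  if r.2 < e then r.1 ++ [(r.2, e)] else r.1

def apply_purge_embargo_py_alt (train_ranges : List (Int × Int)) (test_ranges : List (Int × Int)) (purge_bars : Int) (embargo_bars : Int) : List (Int × Int) :=
  if test_ranges = [] then train_ranges
  else
    let raw := test_ranges.foldl (fun acc tt =>
        acc ++ [(max 0 (tt.1 - purge_bars), tt.1), (tt.2, tt.2 + embargo_bars)]) []
    let ivs := PySem.List.sorted (raw.filter (fun q => decide (q.1 < q.2))) (fun q => q.1) false
    let merged := match ivs with
      | [] => ([] : List (Int × Int))
      | q :: rest => pvMergeGo rest q.1 q.2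
    train_ranges.foldl (fun out se => pvSubRange merged se.2 (out, se.1)) []

-- ===== PRECONDITION & SPEC =====
def Spec_apply_purge_embargo_py (train_ranges : List (Int × Int)) (test_ranges : List (Int × Int)) (purge_bars : Int) (embargo_bars : Int) (out : List (Int × Int)) : Prop := out = apply_purge_embargo_py_alt train_ranges test_ranges purge_bars embargo_bars
instance (train_ranges : List (Int × Int)) (test_ranges : List (Int × Int)) (purge_bars : Int) (embargo_bars : Int) (out : List (Int × Int)) : Decidable (Spec_apply_purge_embargo_py train_ranges test_ranges purge_bars embargo_bars out) := by unfold Spec_apply_purge_embargo_py; infer_instance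

-- ===== CLAIM (what is proved, stated in full; the proofs are below) =====
def Claim_equal_apply_purge_embargo_py : Prop := ∀ (train_ranges : List (Int × Int)) (test_ranges : List (Int × Int)) (purge_bars : Int) (embargo_bars : Int), Dom_apply_purge_embargo_py train_ranges test_ranges purge_bars embargo_bars → Spec_apply_purge_embargo_py train_ranges test_ranges purge_bars embargo_bars (apply_purge_embargo_py train_ranges test_ranges purge_bars embargo_bars)

-- ===== LEMMAS AND PROOFS =====

-- membership of a bar in a list of half-open intervals
def pvIvMem (M : List (Int × Int)) (x : Int) : Bool :=
  M.any (fun q => decide (q.1 ≤ x ∧ x < q.2))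

-- well-formed merged interval list: nonempty intervals, strictly separated
def pvGood (M : List (Int × Int)) : Prop :=
  M.IsChain (fun p q => p.2 < q.1) ∧ ∀ p ∈ M, p.1 < p.2

-- A-side segment scan of one train range, as a function of the bar predicate
def pvContrib (P : Int → Bool) (s e : Int) : List (Int × Int) :=
  pvFin e ((PySem.List.pyRange s e 1).foldl (pvScanStep P) ([], none))

-- B-side subtraction of the merged intervals from one train range
def pvSubRes (M : List (Int × Int)) (s e : Int) : List (Int × Int) :=
  pvSubRange M e ([], s)

theorem pvIvMem_true_iff (M : List (Int × Int)) (x : Int) :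
    pvIvMem M x = true ↔ ∃ q ∈ M, q.1 ≤ x ∧ x < q.2 := by
  simp [pvIvMem]

theorem pvIvMem_cons_true (q : Int × Int) (M : List (Int × Int)) (x : Int) :
    pvIvMem (q :: M) x = true ↔ (q.1 ≤ x ∧ x < q.2) ∨ pvIvMem M x = true := by
  simp [pvIvMem]

theorem pvIvMem_cons_not (a b x : Int) (t : List (Int × Int))
    (h : ¬(a ≤ x ∧ x < b)) : pvIvMem ((a, b) :: t) x = pvIvMem t x := by
  simp only [pvIvMem, List.any_cons, decide_eq_false h, Bool.false_or]

theorem pvIvMem_false_of (M : List (Int × Int)) (x : Int)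
    (h : ∀ q ∈ M, ¬(q.1 ≤ x ∧ x < q.2)) : pvIvMem M x = false := by
  simp only [pvIvMem, List.any_eq_false]
  exact fun q hq => by simpa using h q hq

theorem pvIvMem_true_of (M : List (Int × Int)) (x : Int) (q : Int × Int)
    (hq : q ∈ M) (h : q.1 ≤ x ∧ x < q.2) : pvIvMem M x = true :=
  (pvIvMem_true_iff M x).mpr ⟨q, hq, h⟩

theorem pvFin_acc (e : Int) (p : List (Int × Int)) (u : List (Int × Int) × Option Int) :
    pvFin e (p ++ u.1, u.2) = p ++ pvFin e u := by
  cases h : u.2 <;> simp [pvFin, h]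

theorem pvScanStep_acc (P : Int → Bool) (acc : List (Int × Int)) (st : Option Int) (b : Int) :
    pvScanStep P (acc, st) b =
      (acc ++ (pvScanStep P ([], st) b).1, (pvScanStep P ([], st) b).2) := by
  cases st <;> simp only [pvScanStep] <;> split <;> simp

theorem pvScan_acc (P : Int → Bool) (bars : List Int) (acc : List (Int × Int)) (st : Option Int) :
    bars.foldl (pvScanStep P) (acc, st) =
      (acc ++ (bars.foldl (pvScanStep P) ([], st)).1, (bars.foldl (pvScanStep P) ([], st)).2) := by
  induction bars generalizing acc st with
  | nil => simp
  | cons b t ih =>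
    simp only [List.foldl_cons]
    rw [pvScanStep_acc]
    obtain ⟨u1, u2⟩ := pvScanStep P ([], st) b
    rw [ih, ih u1]
    simp

theorem pvScan_false_some (P : Int → Bool) (bars : List Int)
    (h : ∀ b ∈ bars, P b = false) (acc : List (Int × Int)) (v : Int) :
    bars.foldl (pvScanStep P) (acc, some v) = (acc, some v) := by
  induction bars with
  | nil => rfl
  | cons b t ih =>
    rw [List.foldl_cons,
      show pvScanStep P (acc, some v) b = (acc, some v) from by
        simp [pvScanStep, h b (by simp)]]
    exact ih (fun x hx => h x (by simp [hx]))

theorem pvScan_false_none (P : Int → Bool) (b : Int) (t : List Int)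
    (h : ∀ x ∈ b :: t, P x = false) (acc : List (Int × Int)) :
    (b :: t).foldl (pvScanStep P) (acc, none) = (acc, some b) := by
  rw [List.foldl_cons,
    show pvScanStep P (acc, none) b = (acc, some b) from by
      simp [pvScanStep, h b (by simp)]]
  exact pvScan_false_some P t (fun x hx => h x (by simp [hx])) acc b

theorem pvScan_true_none (P : Int → Bool) (bars : List Int)
    (h : ∀ b ∈ bars, P b = true) (acc : List (Int × Int)) :
    bars.foldl (pvScanStep P) (acc, none) = (acc, none) := by
  induction bars with
  | nil => rfl
  | cons b t ih =>
    rw [List.foldl_cons,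
      show pvScanStep P (acc, none) b = (acc, none) from by
        simp [pvScanStep, h b (by simp)]]
    exact ih (fun x hx => h x (by simp [hx]))

theorem pvScan_true_some (P : Int → Bool) (b : Int) (t : List Int)
    (h : ∀ x ∈ b :: t, P x = true) (acc : List (Int × Int)) (v : Int) :
    (b :: t).foldl (pvScanStep P) (acc, some v) = (acc ++ [(v, b)], none) := by
  rw [List.foldl_cons,
    show pvScanStep P (acc, some v) b = (acc ++ [(v, b)], none) from by
      simp [pvScanStep, h b (by simp)]]
  exact pvScan_true_none P t (fun x hx => h x (by simp [hx])) _

theorem pvSubStep_acc (e : Int) (acc : List (Int × Int)) (cur : Int) (ab : Int × Int) :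
    pvSubStep e (acc, cur) ab =
      (acc ++ (pvSubStep e ([], cur) ab).1, (pvSubStep e ([], cur) ab).2) := by
  simp only [pvSubStep]
  split
  · simp
  · split <;> simp

theorem pvSub_acc (e : Int) (M : List (Int × Int)) (acc : List (Int × Int)) (cur : Int) :
    M.foldl (pvSubStep e) (acc, cur) =
      (acc ++ (M.foldl (pvSubStep e) ([], cur)).1, (M.foldl (pvSubStep e) ([], cur)).2) := by
  induction M generalizing acc cur with
  | nil => simp
  | cons ab t ih =>
    simp only [List.foldl_cons]
    rw [pvSubStep_acc]
    obtain ⟨u1, u2⟩ := pvSubStep e ([], cur) ab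
    rw [ih, ih u1]
    simp

theorem pvSub_skip (e : Int) (M : List (Int × Int)) (h : ∀ q ∈ M, e ≤ q.1)
    (st : List (Int × Int) × Int) : M.foldl (pvSubStep e) st = st := by
  induction M generalizing st with
  | nil => rfl
  | cons ab t ih =>
    rw [List.foldl_cons,
      show pvSubStep e st ab = st from by
        simp only [pvSubStep]
        rw [if_pos (Or.inr (h ab (by simp)))]]
    exact ih (fun q hq => h q (by simp [hq])) st

theorem pvSub_ge (e : Int) (M : List (Int × Int)) (cur : Int) (h : e ≤ cur) :
    (M.foldl (pvSubStep e) ([], cur)).1 = [] ∧ e ≤ (M.foldl (pvSubStep e) ([], cur)).2 := by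
  induction M generalizing cur with
  | nil => exact ⟨rfl, h⟩
  | cons ab t ih =>
    simp only [List.foldl_cons]
    by_cases hc : ab.2 ≤ cur ∨ e ≤ ab.1
    · rw [show pvSubStep e ([], cur) ab = ([], cur) from by
        simp only [pvSubStep]; rw [if_pos hc]]
      exact ih cur h
    · rw [show pvSubStep e ([], cur) ab = ([], ab.2) from by
        simp only [pvSubStep]; rw [if_neg hc, if_neg (by simp; omega)]]
      exact ih ab.2 (by omega)

-- ---- closed forms for B's per-range subtraction ----

theorem pvSubRes_nil (s e : Int) :
    pvSubRes [] s e = if s < e then [(s, e)] else [] := by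
  simp [pvSubRes, pvSubRange]

theorem pvSubRes_ge (M : List (Int × Int)) (s e : Int) (h : e ≤ s) :
    pvSubRes M s e = [] := by
  obtain ⟨h1, h2⟩ := pvSub_ge e M s h
  simp only [pvSubRes, pvSubRange]
  rw [if_neg (by omega)]
  exact h1

theorem pvSubRes_skip_all (M : List (Int × Int)) (s e : Int)
    (h : ∀ q ∈ M, e ≤ q.1) (hse : s < e) : pvSubRes M s e = [(s, e)] := by
  simp only [pvSubRes, pvSubRange]
  rw [pvSub_skip e M h]
  simp [hse]

theorem pvSubRes_cons_skip (s e a b : Int) (t : List (Int × Int))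
    (h : b ≤ s ∨ e ≤ a) : pvSubRes ((a, b) :: t) s e = pvSubRes t s e := by
  simp only [pvSubRes, pvSubRange, List.foldl_cons]
  rw [show pvSubStep e ([], s) (a, b) = ([], s) from by
    simp only [pvSubStep]; rw [if_pos (by simpa using h)]]

theorem pvSubRes_cons_take (s e a b : Int) (t : List (Int × Int))
    (h1 : ¬(b ≤ s ∨ e ≤ a)) :
    pvSubRes ((a, b) :: t) s e = (if s < a then [(s, a)] else []) ++ pvSubRes t b e := by
  simp only [pvSubRes, pvSubRange, List.foldl_cons]
  rw [show pvSubStep e ([], s) (a, b) = ((if s < a then [(s, a)] else []), b) from by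
    simp only [pvSubStep]; rw [if_neg (by simpa using h1)]; split <;> simp]
  rw [pvSub_acc]
  obtain ⟨w1, w2⟩ := t.foldl (pvSubStep e) ([], b)
  by_cases h2 : s < a
  · simp only [if_pos h2]
    split <;> simp
  · simp only [if_neg h2]
    split <;> simp

-- ---- closed forms for A's per-range scan ----

theorem pvContrib_congr (P Q : Int → Bool) (s e : Int)
    (h : ∀ x, s ≤ x → x < e → P x = Q x) : pvContrib P s e = pvContrib Q s e := by
  have hcong : ∀ (acc : List (Int × Int) × Option Int) (x : Int),
      x ∈ PySem.List.pyRange s e 1 → pvScanStep P acc x = pvScanStep Q acc x := by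
    intro acc x hx
    rw [PySem.List.mem_pyRange_one] at hx
    simp only [pvScanStep, h x hx.1 hx.2]
  rw [pvContrib, pvContrib, PySem.List.foldl_congr_mem _ _ _ _ hcong]

theorem pvContrib_false (P : Int → Bool) (s e : Int)
    (h : ∀ x, s ≤ x → x < e → P x = false) :
    pvContrib P s e = if s < e then [(s, e)] else [] := by
  by_cases hse : s < e
  · have hh : ∀ x ∈ s :: PySem.List.pyRange (s + 1) e 1, P x = false := by
      intro x hx
      rw [← PySem.List.pyRange_one_cons hse, PySem.List.mem_pyRange_one] at hx
      exact h x hx.1 hx.2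
    rw [pvContrib, PySem.List.pyRange_one_cons hse, pvScan_false_none P s _ hh []]
    simp [pvFin, hse]
  · rw [pvContrib, PySem.List.pyRange_one_eq_nil (by omega)]
    simp [pvFin, hse]

theorem pvContrib_true_prefix (P : Int → Bool) (s m e : Int) (hsm : s ≤ m) (hme : m ≤ e)
    (h : ∀ x, s ≤ x → x < m → P x = true) : pvContrib P s e = pvContrib P m e := by
  have hh : ∀ x ∈ PySem.List.pyRange s m 1, P x = true := by
    intro x hx
    rw [PySem.List.mem_pyRange_one] at hx
    exact h x hx.1 hx.2
  rw [pvContrib, PySem.List.pyRange_one_append s m e hsm hme, List.foldl_append,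
    pvScan_true_none P _ hh []]
  rfl

theorem pvContrib_false_true (P : Int → Bool) (s a m e : Int)
    (hsa : s < a) (ham : a < m) (hme : m ≤ e)
    (hf : ∀ x, s ≤ x → x < a → P x = false)
    (ht : ∀ x, a ≤ x → x < m → P x = true) :
    pvContrib P s e = (s, a) :: pvContrib P m e := by
  have hhf : ∀ x ∈ s :: PySem.List.pyRange (s + 1) a 1, P x = false := by
    intro x hx
    rw [← PySem.List.pyRange_one_cons hsa, PySem.List.mem_pyRange_one] at hx
    exact hf x hx.1 hx.2
  have hht : ∀ x ∈ a :: PySem.List.pyRange (a + 1) m 1, P x = true := by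
    intro x hx
    rw [← PySem.List.pyRange_one_cons ham, PySem.List.mem_pyRange_one] at hx
    exact ht x hx.1 hx.2
  rw [pvContrib, PySem.List.pyRange_one_append s a e (by omega) (by omega),
    PySem.List.pyRange_one_append a m e (by omega) hme, List.foldl_append, List.foldl_append,
    PySem.List.pyRange_one_cons hsa, pvScan_false_none P s _ hhf [],
    PySem.List.pyRange_one_cons ham, pvScan_true_some P a _ hht [] s,
    List.nil_append, pvScan_acc, pvFin_acc, pvContrib]
  simp

-- ---- structure of the merged interval list ----

theorem pvChain_lb (M : List (Int × Int)) (a b : Int) (h : pvGood ((a, b) :: M)) :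
    ∀ q ∈ M, b < q.1 := by
  induction M generalizing a b with
  | nil => simp
  | cons cd t ih =>
    obtain ⟨hch, hne⟩ := h
    rw [List.isChain_cons_cons] at hch
    intro q hq
    rcases List.mem_cons.mp hq with hq | hq
    · subst hq; exact hch.1
    · have hcd : cd.1 < cd.2 := hne cd (by simp)
      have := ih cd.1 cd.2 ⟨by simpa using hch.2, fun p hp => hne p (by simp [hp])⟩ q hq
      omega

theorem pvMergeGo_spec (rest : List (Int × Int)) (lo hi : Int) (hlh : lo < hi)
    (hp : rest.Pairwise (fun p q => p.1 ≤ q.1)) (hlo : ∀ q ∈ rest, lo ≤ q.1)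
    (hne : ∀ q ∈ rest, q.1 < q.2) :
    pvGood (pvMergeGo rest lo hi) ∧ (∃ h' t, pvMergeGo rest lo hi = (lo, h') :: t) ∧
      (∀ x, pvIvMem (pvMergeGo rest lo hi) x = true ↔
        ((lo ≤ x ∧ x < hi) ∨ pvIvMem rest x = true)) := by
  induction rest generalizing lo hi with
  | nil =>
    refine ⟨⟨List.isChain_singleton _, ?_⟩, ⟨hi, [], rfl⟩, ?_⟩
    · intro q hq
      simp only [pvMergeGo, List.mem_singleton] at hq
      subst hq; exact hlh
    · intro x
      simp [pvMergeGo, pvIvMem]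
  | cons ab t ih =>
    rw [List.pairwise_cons] at hp
    have hab : ab.1 < ab.2 := hne ab (by simp)
    have hlo' : lo ≤ ab.1 := hlo ab (by simp)
    by_cases hc : ab.1 ≤ hi
    · rw [show pvMergeGo (ab :: t) lo hi = pvMergeGo t lo (max hi ab.2) from by
        rw [pvMergeGo]; rw [if_pos hc]]
      obtain ⟨g, hd, u⟩ := ih lo (max hi ab.2) (by omega) hp.2
        (fun q hq => hlo q (by simp [hq])) (fun q hq => hne q (by simp [hq]))
      refine ⟨g, hd, ?_⟩
      intro x
      rw [u x, pvIvMem_cons_true]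
      by_cases hQ : pvIvMem t x = true <;> simp [hQ] <;> omega
    · rw [show pvMergeGo (ab :: t) lo hi = (lo, hi) :: pvMergeGo t ab.1 ab.2 from by
        rw [pvMergeGo]; rw [if_neg hc]]
      obtain ⟨g, ⟨h', t', heq⟩, u⟩ := ih ab.1 ab.2 hab hp.2
        (fun q hq => hp.1 q hq) (fun q hq => hne q (by simp [hq]))
      refine ⟨⟨?_, ?_⟩, ⟨hi, _, rfl⟩, ?_⟩
      · rw [heq] at g ⊢
        exact List.isChain_cons_cons.mpr ⟨show hi < ab.1 by omega, g.1⟩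
      · intro q hq
        rcases List.mem_cons.mp hq with hq | hq
        · subst hq; exact hlh
        · exact g.2 q hq
      · intro x
        simp only [pvIvMem_cons_true, u x]

-- the merged list obtained from a sorted list of nonempty intervals
def pvMerge (ivs : List (Int × Int)) : List (Int × Int) :=
  match ivs with
  | [] => ([] : List (Int × Int))
  | q :: rest => pvMergeGo rest q.1 q.2

theorem pvMergedFacts (ivs : List (Int × Int))
    (hpair : ivs.Pairwise (fun q q' => q.1 ≤ q'.1)) (hne : ∀ q ∈ ivs, q.1 < q.2) :
    pvGood (pvMerge ivs) ∧
    ∀ x, (pvIvMem (pvMerge ivs) x = true ↔ pvIvMem ivs x = true) := by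
  unfold pvMerge
  cases ivs with
  | nil => exact ⟨⟨by simp, by simp⟩, fun x => Iff.rfl⟩
  | cons q0 rest =>
    rw [List.pairwise_cons] at hpair
    obtain ⟨g, _, u⟩ := pvMergeGo_spec rest q0.1 q0.2 (hne q0 (by simp)) hpair.2
      (fun q hq => hpair.1 q hq) (fun q hq => hne q (by simp [hq]))
    exact ⟨g, fun x => by rw [u x, pvIvMem_cons_true]⟩

-- ---- the core equivalence on one train range ----

theorem pvCore (e : Int) (M : List (Int × Int)) (hg : pvGood M) (s : Int) :
    pvContrib (fun x => pvIvMem M x) s e = pvSubRes M s e := by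
  induction M generalizing s with
  | nil =>
    rw [pvContrib_false _ _ _ (fun x _ _ => by simp [pvIvMem]), pvSubRes_nil]
  | cons ab t ih =>
    obtain ⟨a, b⟩ := ab
    have hab : a < b := hg.2 (a, b) (by simp)
    have hlb : ∀ q ∈ t, b < q.1 := pvChain_lb t a b hg
    have hgt : pvGood t := ⟨by simpa using hg.1.tail, fun p hp => hg.2 p (by simp [hp])⟩
    by_cases hse : s < e
    · by_cases hbs : b ≤ s
      · -- interval entirely below the range: drop it on both sides
        rw [pvContrib_congr _ (fun x => pvIvMem t x) s e
            (fun x hx _ => pvIvMem_cons_not a b x t (by omega)),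
          ih hgt s, pvSubRes_cons_skip s e a b t (Or.inl hbs)]
      · by_cases hae : e ≤ a
        · -- this interval (and all later ones) lies entirely above the range
          rw [pvContrib_false _ _ _ (fun x hx1 hx2 => pvIvMem_false_of _ _ (by
            intro q hq
            rcases List.mem_cons.mp hq with hq | hq
            · subst hq; simp; omega
            · have := hlb q hq; omega)),
            pvSubRes_cons_skip s e a b t (Or.inr hae),
            pvSubRes_skip_all t s e (fun q hq => by have := hlb q hq; omega) hse]
          simp [hse]
        · -- the interval overlaps [s, e)
          have htail : pvContrib (fun x => pvIvMem ((a, b) :: t) x) (min b e) e =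
              pvSubRes t b e := by
            by_cases hbe : b < e
            · rw [show min b e = b by omega,
                pvContrib_congr _ (fun x => pvIvMem t x) b e
                  (fun x hx _ => pvIvMem_cons_not a b x t (by omega)),
                ih hgt b]
            · rw [show min b e = e by omega,
                pvContrib_false _ _ _ (fun x hx1 hx2 => by omega),
                pvSubRes_ge t b e (by omega)]
              simp
          by_cases hsa : s < a
          · -- false block [s, a), then a true block [a, min b e), then the rest
            rw [pvContrib_false_true _ s a (min b e) e hsa (by omega) (by omega)
                (fun x hx1 hx2 => pvIvMem_false_of _ _ (by
                  intro q hq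
                  rcases List.mem_cons.mp hq with hq | hq
                  · subst hq; simp; omega
                  · have := hlb q hq; omega))
                (fun x hx1 hx2 => pvIvMem_true_of _ _ (a, b) (by simp) (by simp; omega)),
              htail, pvSubRes_cons_take s e a b t (by omega)]
            rw [if_pos hsa]
            rfl
          · -- the interval already covers s: a true block [s, min b e), then the rest
            rw [pvContrib_true_prefix _ s (min b e) e (by omega) (by omega)
                (fun x hx1 hx2 => pvIvMem_true_of _ _ (a, b) (by simp) (by simp; omega)),
              htail, pvSubRes_cons_take s e a b t (by omega)]
            rw [if_neg hsa]
            rfl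
    · -- empty train range: both sides produce nothing
      rw [pvContrib_false _ _ _ (fun x hx1 hx2 => by omega),
        pvSubRes_ge _ _ _ (by omega)]
      simp [hse]

-- ---- flattening the outer loops ----

theorem pvA_flat (P : Int → Bool) (tr : List (Int × Int)) :
    tr.foldl (fun acc se => pvFin se.2 ((PySem.List.pyRange se.1 se.2 1).foldl
      (pvScanStep P) (acc, none))) [] =
    tr.flatMap (fun se => pvContrib P se.1 se.2) := by
  have hcong : ∀ (acc : List (Int × Int)) (se : Int × Int), se ∈ tr →
      pvFin se.2 ((PySem.List.pyRange se.1 se.2 1).foldl (pvScanStep P) (acc, none)) =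
      acc ++ pvContrib P se.1 se.2 := by
    intro acc se _
    rw [pvScan_acc, pvFin_acc, pvContrib]
  rw [PySem.List.foldl_congr_mem _ _ _ _ hcong]
  simpa using PySem.List.foldl_append_eq_flatMap (fun se : Int × Int => pvContrib P se.1 se.2) tr []

theorem pvB_flat (M : List (Int × Int)) (tr : List (Int × Int)) :
    tr.foldl (fun out se => pvSubRange M se.2 (out, se.1)) [] =
    tr.flatMap (fun se => pvSubRes M se.1 se.2) := by
  have hcong : ∀ (out : List (Int × Int)) (se : Int × Int), se ∈ tr →
      pvSubRange M se.2 (out, se.1) = out ++ pvSubRes M se.1 se.2 := by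
    intro out se _
    simp only [pvSubRange, pvSubRes]
    rw [pvSub_acc]
    obtain ⟨w1, w2⟩ := M.foldl (pvSubStep se.2) ([], se.1)
    split <;> simp
  rw [PySem.List.foldl_congr_mem _ _ _ _ hcong]
  simpa using PySem.List.foldl_append_eq_flatMap (fun se : Int × Int => pvSubRes M se.1 se.2) tr []

-- ---- membership in A's excluded set ----

theorem pvSetFoldl_mem (s : Std.HashSet Int) (l : List Int) (x : Int) :
    x ∈ l.foldl (fun s b => s.insert b) s ↔ x ∈ s ∨ x ∈ l := by
  induction l generalizing s with
  | nil => simp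
  | cons y t ih =>
    rw [List.foldl_cons, ih, Std.HashSet.mem_insert]
    simp only [List.mem_cons, beq_iff_eq]
    tauto

theorem pvExcluded_mem (p em : Int) (l : List (Int × Int)) (ex : Std.HashSet Int) (x : Int) :
    x ∈ l.foldl (fun ex tt =>
        (PySem.List.pyRange tt.2 (tt.2 + em) 1).foldl (fun s b => s.insert b)
          ((PySem.List.pyRange (max 0 (tt.1 - p)) tt.1 1).foldl (fun s b => s.insert b) ex)) ex ↔
      x ∈ ex ∨ ∃ tt ∈ l, (max 0 (tt.1 - p) ≤ x ∧ x < tt.1) ∨ (tt.2 ≤ x ∧ x < tt.2 + em) := by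
  induction l generalizing ex with
  | nil => simp
  | cons tt t ih =>
    rw [List.foldl_cons, ih, pvSetFoldl_mem, pvSetFoldl_mem,
      PySem.List.mem_pyRange_one, PySem.List.mem_pyRange_one]
    simp only [List.exists_mem_cons_iff]
    constructor
    · rintro (((h | h) | h) | h)
      · exact Or.inl h
      · exact Or.inr (Or.inl (Or.inl h))
      · exact Or.inr (Or.inl (Or.inr h))
      · exact Or.inr (Or.inr h)
    · rintro (h | (h | h) | h)
      · exact Or.inl (Or.inl (Or.inl h))
      · exact Or.inl (Or.inl (Or.inr h))
      · exact Or.inl (Or.inr h)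
      · exact Or.inr h

-- ---- assembling the two programs ----

theorem pvAssemble (tr : List (Int × Int)) (Ex : Std.HashSet Int) (M : List (Int × Int))
    (hg : pvGood M) (hP : ∀ x, Ex.contains x = pvIvMem M x) :
    tr.foldl (fun acc se => pvFin se.2 ((PySem.List.pyRange se.1 se.2 1).foldl
      (pvScanStep (fun b => Ex.contains b)) (acc, none))) [] =
    tr.foldl (fun out se => pvSubRange M se.2 (out, se.1)) [] := by
  rw [pvA_flat, pvB_flat,
    show (fun b => Ex.contains b) = (fun x => pvIvMem M x) from funext hP,
    show (fun se : Int × Int => pvContrib (fun x => pvIvMem M x) se.1 se.2) =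
      (fun se : Int × Int => pvSubRes M se.1 se.2) from
      funext (fun se => pvCore se.2 M hg se.1)]

theorem pvMain (tr te : List (Int × Int)) (p em : Int) :
    apply_purge_embargo_py tr te p em = apply_purge_embargo_py_alt tr te p em := by
  by_cases hte : te = []
  · simp [apply_purge_embargo_py, apply_purge_embargo_py_alt, hte]
  · simp only [apply_purge_embargo_py, apply_purge_embargo_py_alt, if_neg hte]
    set rawT := te.foldl (fun acc tt =>
        acc ++ [(max 0 (tt.1 - p), tt.1), (tt.2, tt.2 + em)]) [] with hraw
    set ivsT := PySem.List.sorted (rawT.filter (fun q => decide (q.1 < q.2)))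
      (fun q => q.1) false with hivs
    -- the raw interval list, flattened
    have hrawflat : rawT = te.flatMap
        (fun tt => [(max 0 (tt.1 - p), tt.1), (tt.2, tt.2 + em)]) := by
      rw [hraw]
      simpa using PySem.List.foldl_append_eq_flatMap
        (fun tt : Int × Int => [(max 0 (tt.1 - p), tt.1), (tt.2, tt.2 + em)]) te []
    -- sortedness facts about ivs
    have hperm : ivsT.Perm (rawT.filter (fun q => decide (q.1 < q.2))) :=
      PySem.List.sorted_perm _ _ _
    have hpair : ivsT.Pairwise (fun q q' => q.1 ≤ q'.1) := PySem.List.sorted_pairwise _ _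
    have hneiv : ∀ q ∈ ivsT, q.1 < q.2 := by
      intro q hq
      exact of_decide_eq_true (List.mem_filter.mp ((hperm.mem_iff).mp hq)).2
    -- membership in ivs intervals = membership in raw intervals
    have hivsmem : ∀ x : Int, pvIvMem ivsT x = true ↔ ∃ q ∈ rawT, q.1 ≤ x ∧ x < q.2 := by
      intro x
      rw [pvIvMem_true_iff]
      constructor
      · rintro ⟨q, hq, h⟩
        exact ⟨q, (List.mem_filter.mp ((hperm.mem_iff).mp hq)).1, h⟩
      · rintro ⟨q, hq, h⟩
        exact ⟨q, (hperm.mem_iff).mpr (List.mem_filter.mpr ⟨hq, by simp; omega⟩), h⟩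
    obtain ⟨hgood, hunion⟩ := pvMergedFacts ivsT hpair hneiv
    rw [show (match ivsT with
      | [] => ([] : List (Int × Int))
      | q :: rest => pvMergeGo rest q.1 q.2) = pvMerge ivsT from rfl]
    refine pvAssemble tr _ _ hgood ?_
    intro x
    rw [Bool.eq_iff_iff, Std.HashSet.contains_iff_mem, pvExcluded_mem, hunion x, hivsmem x]
    rw [hrawflat]
    simp only [List.mem_flatMap, List.mem_cons, List.not_mem_nil, or_false]
    constructor
    · rintro (h | ⟨tt, htt, h | h⟩)
      · simp at h
      · exact ⟨_, ⟨tt, htt, Or.inl rfl⟩, h⟩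
      · exact ⟨_, ⟨tt, htt, Or.inr rfl⟩, h⟩
    · rintro ⟨q, ⟨tt, htt, hq | hq⟩, h⟩
      · exact Or.inr ⟨tt, htt, Or.inl (by subst hq; exact h)⟩
      · exact Or.inr ⟨tt, htt, Or.inr (by subst hq; exact h)⟩

-- ===== VERDICT (by name: the statement is the Claim_ definition above) =====
theorem apply_purge_embargo_py_spec : Claim_equal_apply_purge_embargo_py := by
  intro tr te p em _
  unfold Spec_apply_purge_embargo_py
  exact pvMain tr te p em
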